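-- pv_equiv track=rewrite | github.com/cjpmaubry/MetroOfGotham | Temporaire2.py | FromNameToAscii
-- ===== SOURCE A (Python) =====
-- def FromNameToAscii(name):
--     crypted_name = 0
--     offset = 1000
--     len_name = len(name)
--     position = 0
--     for letter in name:
--         if position <= len_name:
--             crypted_name += ord(name[position]) * pow(offset, len_name - position - 1)
--             position += 1
--     return crypted_name
-- ===== SOURCE B (Python) =====
-- def FromNameToAscii(name):
--     crypted = 0
--     for letter in name:
--         crypted = crypted * 1000 + ord(letter)
--     return crypted
-- ===== Notes on version B (the rewrite author's own statement) =====
-- stated objective: faster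
-- what changed: Replaces per-character pow(1000, len-pos-1) big-integer exponentiations with Horner's rule (crypted = crypted*1000 + ord(letter)), one multiply per character and no indexing.
import Mathlib
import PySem

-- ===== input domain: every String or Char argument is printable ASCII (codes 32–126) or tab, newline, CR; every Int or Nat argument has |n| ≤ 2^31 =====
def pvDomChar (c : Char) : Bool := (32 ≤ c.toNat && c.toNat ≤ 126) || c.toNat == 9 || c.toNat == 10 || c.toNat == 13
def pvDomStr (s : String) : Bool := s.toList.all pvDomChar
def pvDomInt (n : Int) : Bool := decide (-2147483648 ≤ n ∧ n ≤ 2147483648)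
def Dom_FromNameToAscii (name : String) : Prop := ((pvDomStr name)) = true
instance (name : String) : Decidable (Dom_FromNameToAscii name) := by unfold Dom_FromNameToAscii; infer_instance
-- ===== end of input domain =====

-- B replaces A's per-character pow(1000, len-pos-1) with Horner's rule (objective: faster, one multiply per char).

-- ===== PORT A =====
-- literal port of A: fold over the letters carrying (crypted_name, position), indexing name[position]
def FromNameToAscii (name : String) : Int :=
  let len_name : Int := (name.toList.length : Int)
  (name.toList.foldl
    (fun (st : Int × Int) _letter =>
      if st.2 ≤ len_name then
        (st.1 + (((PySem.Str.pyGet? name st.2).getD (Char.ofNat 0)).toNat : Int)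
                  * 1000 ^ (len_name - st.2 - 1).toNat,
         st.2 + 1)
      else st)
    (0, 0)).1

-- ===== PORT B =====
def FromNameToAscii_alt (name : String) : Int :=
  name.toList.foldl (fun crypted letter => crypted * 1000 + (letter.toNat : Int)) 0

-- ===== PRECONDITION & SPEC =====
def Spec_FromNameToAscii (name : String) (out : Int) : Prop := out = FromNameToAscii_alt name
instance (name : String) (out : Int) : Decidable (Spec_FromNameToAscii name out) := by unfold Spec_FromNameToAscii; infer_instance

-- ===== CLAIM (what is proved, stated in full; the proofs are below) =====
def Claim_equal_FromNameToAscii : Prop := ∀ (name : String), Dom_FromNameToAscii name → Spec_FromNameToAscii name (FromNameToAscii name)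

-- ===== LEMMAS AND PROOFS =====

-- Horner fold from an arbitrary accumulator
theorem horner_foldl_shift (l : List Char) (acc : Int) :
    l.foldl (fun c letter => c * 1000 + (letter.toNat : Int)) acc
      = acc * 1000 ^ l.length + l.foldl (fun c letter => c * 1000 + (letter.toNat : Int)) 0 := by
  induction l generalizing acc with
  | nil => simp
  | cons c t ih =>
    simp only [List.foldl_cons, List.length_cons]
    rw [ih (acc * 1000 + (c.toNat : Int)), ih (0 * 1000 + (c.toNat : Int))]
    ring

theorem fromName_aux (name : String) :
    ∀ (rest pre : List Char) (acc : Int), pre ++ rest = name.toList →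
    (rest.foldl
      (fun (st : Int × Int) _letter =>
        if st.2 ≤ (name.toList.length : Int) then
          (st.1 + (((PySem.Str.pyGet? name st.2).getD (Char.ofNat 0)).toNat : Int)
                    * 1000 ^ (((name.toList.length : Int)) - st.2 - 1).toNat,
           st.2 + 1)
        else st)
      (acc, (pre.length : Int))).1
      = acc + rest.foldl (fun c letter => c * 1000 + (letter.toNat : Int)) 0 := by
  intro rest
  induction rest with
  | nil => intro pre acc _; simp
  | cons c t ih =>
    intro pre acc h
    have hlen : pre.length + (t.length + 1) = name.toList.length := by
      rw [← h]; simp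
    have hle : (pre.length : Int) ≤ (name.toList.length : Int) := by
      exact_mod_cast Nat.le_of_add_right_le (le_of_eq hlen)
    have hget : PySem.Str.pyGet? name (pre.length : Int) = some c := by
      rw [PySem.Str.pyGet?_natCast, ← h]
      simp
    simp only [List.foldl_cons, if_pos hle, hget, Option.getD_some]
    have hexp : (((name.toList.length : Int)) - (pre.length : Int) - 1).toNat = t.length := by
      omega
    have hpre : ((pre.length : Int) + 1) = (((pre ++ [c]).length : Nat) : Int) := by
      simp
    rw [hexp, hpre, ih (pre ++ [c]) _ (by simpa using h)]
    rw [horner_foldl_shift t ((0 : Int) * 1000 + (c.toNat : Int))]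
    ring

-- ===== VERDICT (by name: the statement is the Claim_ definition above) =====
theorem FromNameToAscii_spec : Claim_equal_FromNameToAscii := by
  intro name _
  unfold Spec_FromNameToAscii FromNameToAscii FromNameToAscii_alt
  simpa using fromName_aux name name.toList [] 0 rfl
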